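-- pv_equiv track=rewrite | github.com/Ringhu/LCTSCap | src/lctscap/data/splits.py | verify_no_leakage
-- ===== SOURCE A (Python) =====
-- from typing import Dict, List
--
-- def verify_no_leakage(splits: Dict[str, List[str]]) -> bool:
--     """Verify that no participant appears in more than one split.
--
--     Args:
--         splits: Dictionary mapping split name to participant IDs.
--
--     Returns:
--         ``True`` if splits are disjoint, ``False`` otherwise.
--     """
--     split_names = list(splits.keys())
--     for i in range(len(split_names)):
--         for j in range(i + 1, len(split_names)):
--             set_a = set(splits[split_names[i]])
--             set_b = set(splits[split_names[j]])
--             overlap = set_a & set_b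
--             if overlap:
--                 return False
--     return True
-- ===== SOURCE B (Python) =====
-- from typing import Dict, List
--
-- def verify_no_leakage(splits: Dict[str, List[str]]) -> bool:
--     """Single pass: keep one global set of already-seen participants and
--     check each split against it, instead of intersecting every pair of splits."""
--     seen = set()
--     for ids in splits.values():
--         if not seen.isdisjoint(ids):
--             return False
--         seen.update(ids)
--     return True
-- ===== Notes on version B (the rewrite author's own statement) =====
-- stated objective: simpler
-- what changed: Replaces the pairwise intersection of every two split sets by a single pass that accumulates one global seen-set and checks each split's ids against it.
import Mathlib
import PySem

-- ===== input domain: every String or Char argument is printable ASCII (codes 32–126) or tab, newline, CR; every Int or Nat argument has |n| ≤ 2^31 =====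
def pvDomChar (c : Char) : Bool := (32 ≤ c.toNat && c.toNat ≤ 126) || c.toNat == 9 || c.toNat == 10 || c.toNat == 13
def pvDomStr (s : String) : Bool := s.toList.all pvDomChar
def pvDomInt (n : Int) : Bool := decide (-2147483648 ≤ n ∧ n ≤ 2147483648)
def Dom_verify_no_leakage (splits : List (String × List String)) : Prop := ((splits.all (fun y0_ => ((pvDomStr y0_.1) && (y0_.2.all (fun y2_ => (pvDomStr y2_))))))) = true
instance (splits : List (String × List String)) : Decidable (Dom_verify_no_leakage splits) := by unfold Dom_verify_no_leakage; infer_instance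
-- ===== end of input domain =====

-- B replaces A's pairwise set intersections by a single pass with one accumulated
-- seen-set (objective: simpler).

-- ===== PORT A =====
-- inner loop 'for j in range(i+1, …)': compares set_a (the i-th split's set)
-- with each later split's set; 'if overlap: return False' is the else-branch
def pvAInner (set_a : PySem.Set String) : List (String × List String) → Bool
  | [] => true
  | (_, v_j) :: rest =>
      let set_b := PySem.Set.ofList v_j
      let overlap := PySem.Set.inter set_a set_b
      if overlap.isEmpty then pvAInner set_a rest else false

-- outer loop over i; the early 'return False' propagates through &&
def pvAOuter : List (String × List String) → Bool
  | [] => true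
  | (_, v_i) :: rest => pvAInner (PySem.Set.ofList v_i) rest && pvAOuter rest

def verify_no_leakage (splits : List (String × List String)) : Bool :=
  pvAOuter splits

-- ===== PORT B =====
-- single pass: 'seen' is the union of all earlier splits' ids
def pvBLoop (seen : PySem.Set String) : List (String × List String) → Bool
  | [] => true
  | (_, ids) :: rest =>
      if PySem.Set.isdisjoint seen ids then pvBLoop (PySem.Set.update seen ids) rest
      else false

def verify_no_leakage_alt (splits : List (String × List String)) : Bool :=
  pvBLoop PySem.Set.empty splits

-- ===== PRECONDITION & SPEC =====
def Spec_verify_no_leakage (splits : List (String × List String)) (out : Bool) : Prop := out = verify_no_leakage_alt splits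
instance (splits : List (String × List String)) (out : Bool) : Decidable (Spec_verify_no_leakage splits out) := by unfold Spec_verify_no_leakage; infer_instance

-- ===== CLAIM (what is proved, stated in full; the proofs are below) =====
def Claim_equal_verify_no_leakage : Prop := ∀ (splits : List (String × List String)), Dom_verify_no_leakage splits → Spec_verify_no_leakage splits (verify_no_leakage splits)

-- ===== LEMMAS AND PROOFS =====

-- A's inner loop is an 'all' over the later splits
theorem pvAInner_eq_all (s : PySem.Set String) (l : List (String × List String)) :
    pvAInner s l = l.all (fun e => (PySem.Set.inter s (PySem.Set.ofList e.2)).isEmpty) := by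
  induction l with
  | nil => rfl
  | cons hd tl ih =>
      obtain ⟨k, v⟩ := hd
      simp [pvAInner, ih]
      congr 1
      rw [Bool.eq_iff_iff]
      simp [List.isEmpty_iff]

-- membership characterisations, as Prop
theorem inter_isEmpty_iff (a b : List String) :
    (PySem.Set.inter (PySem.Set.ofList a) (PySem.Set.ofList b)).isEmpty = true ↔
      ∀ x ∈ a, x ∉ b := by
  simp [PySem.Set.inter, List.isEmpty_iff, List.filter_eq_nil_iff, PySem.Set.mem_ofList]

theorem isdisjoint_iff (s : PySem.Set String) (t : List String) :
    PySem.Set.isdisjoint s t = true ↔ ∀ x ∈ s, x ∉ t := by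
  simp [PySem.Set.isdisjoint]

theorem mem_update (s : PySem.Set String) (l : List String) (x : String) :
    x ∈ PySem.Set.update s l ↔ x ∈ s ∨ x ∈ l := by
  induction l generalizing s with
  | nil => simp [PySem.Set.update]
  | cons hd tl ih =>
      simp only [PySem.Set.update, List.foldl_cons] at *
      rw [ih]
      simp [PySem.Set.mem_add]
      tauto

theorem isdisjoint_update (seen : PySem.Set String) (v w : List String) :
    PySem.Set.isdisjoint (PySem.Set.update seen v) w =
      (PySem.Set.isdisjoint seen w &&
       (PySem.Set.inter (PySem.Set.ofList v) (PySem.Set.ofList w)).isEmpty) := by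
  rw [Bool.eq_iff_iff]
  simp only [Bool.and_eq_true, isdisjoint_iff, inter_isEmpty_iff]
  constructor
  · intro hall
    exact ⟨fun x hx => hall x ((mem_update _ _ _).2 (Or.inl hx)),
           fun x hx => hall x ((mem_update _ _ _).2 (Or.inr hx))⟩
  · rintro ⟨h1, h2⟩ x hx
    rcases (mem_update _ _ _).1 hx with h' | h'
    · exact h1 x h'
    · exact h2 x h'

-- B's loop invariant: it is A's pairwise check AND the disjointness of every split from 'seen'
theorem pvBLoop_eq (l : List (String × List String)) (seen : PySem.Set String) :
    pvBLoop seen l =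
      (l.all (fun e => PySem.Set.isdisjoint seen e.2) && pvAOuter l) := by
  induction l generalizing seen with
  | nil => rfl
  | cons hd tl ih =>
      obtain ⟨k, v⟩ := hd
      simp only [pvBLoop, pvAOuter, List.all_cons]
      by_cases h : PySem.Set.isdisjoint seen v = true
      · rw [if_pos h, ih, h, pvAInner_eq_all]
        simp only [Bool.true_and, isdisjoint_update]
        rw [Bool.eq_iff_iff]
        simp only [Bool.and_eq_true, List.all_eq_true]
        exact ⟨fun ⟨h1, h2⟩ => ⟨fun x hx => (h1 x hx).1, fun x hx => (h1 x hx).2, h2⟩,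
               fun ⟨h1, h2, h3⟩ => ⟨fun x hx => ⟨h1 x hx, h2 x hx⟩, h3⟩⟩
      · rw [if_neg h]
        simp only [Bool.not_eq_true] at h
        rw [h]
        simp

-- ===== VERDICT (by name: the statement is the Claim_ definition above) =====
theorem verify_no_leakage_spec : Claim_equal_verify_no_leakage := by
  intro splits _
  unfold Spec_verify_no_leakage verify_no_leakage verify_no_leakage_alt
  rw [pvBLoop_eq]
  have : splits.all (fun e => PySem.Set.isdisjoint PySem.Set.empty e.2) = true := by
    simp [PySem.Set.empty]
  rw [this, Bool.true_and]
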